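-- pv_equiv track=rewrite | github.com/ShreyashGitHubb/MedScan-AI | backend/app/enhanced_medical_analyzer.py | _get_condition_priority
-- ===== SOURCE A (Python) =====
-- def _get_condition_priority(condition: str) -> int:
--     """Get clinical priority score for condition (higher = more urgent)"""
--     priority_scores = {
--         "pneumothorax": 10,  # Highest priority - emergency
--         "tension pneumothorax": 10,
--         "pneumonia": 8,
--         "covid_pneumonia": 8,
--         "pleural_effusion": 7,
--         "tuberculosis": 7,
--         "cardiac": 6,
--         "copd": 5,
--         "asthma": 5,
--         "bronchitis": 4,
--         "atelectasis": 3,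
--         "normal": 1
--     }
--
--     condition_lower = condition.lower()
--     for key, score in priority_scores.items():
--         if key in condition_lower:
--             return score
--
--     return 2  # Default priority
-- ===== SOURCE B (Python) =====
-- def _get_condition_priority(condition: str) -> int:
--     """Get clinical priority score for condition (higher = more urgent)"""
--     priority_scores = {
--         "pneumothorax": 10,  # Highest priority - emergency
--         "tension pneumothorax": 10,
--         "pneumonia": 8,
--         "covid_pneumonia": 8,
--         "pleural_effusion": 7,
--         "tuberculosis": 7,
--         "cardiac": 6,
--         "copd": 5,
--         "asthma": 5,
--         "bronchitis": 4,
--         "atelectasis": 3,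
--         "normal": 1
--     }
--
--     condition_lower = condition.lower()
--     return max(
--         (score for key, score in priority_scores.items() if key in condition_lower),
--         default=2,
--     )
-- ===== Notes on version B (the rewrite author's own statement) =====
-- stated objective: simpler
-- what changed: Replaces the ordered first-match early-return loop with a single max-reduction over all matching keys (correct because the table's scores are non-increasing, so the first hit is also the maximum hit).
import Mathlib
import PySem

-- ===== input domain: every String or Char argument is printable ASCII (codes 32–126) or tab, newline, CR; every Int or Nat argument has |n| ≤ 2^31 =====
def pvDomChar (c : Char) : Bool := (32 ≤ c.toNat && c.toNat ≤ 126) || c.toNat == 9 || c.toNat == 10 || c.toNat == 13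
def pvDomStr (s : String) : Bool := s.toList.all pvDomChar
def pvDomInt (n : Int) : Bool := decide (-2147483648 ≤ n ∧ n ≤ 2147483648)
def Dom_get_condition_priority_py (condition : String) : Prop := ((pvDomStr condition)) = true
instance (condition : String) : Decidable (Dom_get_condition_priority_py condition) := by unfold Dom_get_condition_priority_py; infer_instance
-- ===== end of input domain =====

-- B replaces A's ordered first-match early-return loop by a max-reduction over all
-- matching keys (valid since the table's scores are non-increasing); objective: simpler.


-- the dict literal, shared verbatim by both ports (insertion order)
def pvPriorityScores : List (String × Int) :=
  [("pneumothorax", 10), ("tension pneumothorax", 10), ("pneumonia", 8),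
   ("covid_pneumonia", 8), ("pleural_effusion", 7), ("tuberculosis", 7),
   ("cardiac", 6), ("copd", 5), ("asthma", 5), ("bronchitis", 4),
   ("atelectasis", 3), ("normal", 1)]

-- ===== PORT A =====
-- the 'for key, score … if key in condition_lower: return score' loop with default 2
def pvPrioLoop : List (String × Int) → String → Int
  | [], _ => 2
  | (k, v) :: rest, cl => if PySem.Str.isIn k cl then v else pvPrioLoop rest cl

def get_condition_priority_py (condition : String) : Int :=
  pvPrioLoop pvPriorityScores (PySem.Str.lower condition)

-- ===== PORT B =====
-- max(score for key, score in … if key in condition_lower) with default=2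
def get_condition_priority_py_alt (condition : String) : Int :=
  let cl := PySem.Str.lower condition
  (PySem.List.max?
      ((pvPriorityScores.filter (fun p => PySem.Str.isIn p.1 cl)).map Prod.snd)
      (fun y => y)).getD 2

-- ===== PRECONDITION & SPEC =====
def Spec_get_condition_priority_py (condition : String) (out : Int) : Prop := out = get_condition_priority_py_alt condition
instance (condition : String) (out : Int) : Decidable (Spec_get_condition_priority_py condition out) := by unfold Spec_get_condition_priority_py; infer_instance

-- ===== CLAIM (what is proved, stated in full; the proofs are below) =====
def Claim_equal_get_condition_priority_py : Prop := ∀ (condition : String), Dom_get_condition_priority_py condition → Spec_get_condition_priority_py condition (get_condition_priority_py condition)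

-- ===== LEMMAS AND PROOFS =====

-- Both ports are functions of the twelve membership tests only; since the scores are
-- non-increasing in table order, first-hit equals max-of-hits for EVERY boolean vector.
set_option maxHeartbeats 2000000 in
theorem pvFirstHit_eq_maxHit (condition : String) :
    get_condition_priority_py condition = get_condition_priority_py_alt condition := by
  unfold get_condition_priority_py get_condition_priority_py_alt pvPriorityScores
  simp only [pvPrioLoop, List.filter]
  generalize PySem.Str.isIn "pneumothorax" (PySem.Str.lower condition) = b1
  generalize PySem.Str.isIn "tension pneumothorax" (PySem.Str.lower condition) = b2
  generalize PySem.Str.isIn "pneumonia" (PySem.Str.lower condition) = b3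
  generalize PySem.Str.isIn "covid_pneumonia" (PySem.Str.lower condition) = b4
  generalize PySem.Str.isIn "pleural_effusion" (PySem.Str.lower condition) = b5
  generalize PySem.Str.isIn "tuberculosis" (PySem.Str.lower condition) = b6
  generalize PySem.Str.isIn "cardiac" (PySem.Str.lower condition) = b7
  generalize PySem.Str.isIn "copd" (PySem.Str.lower condition) = b8
  generalize PySem.Str.isIn "asthma" (PySem.Str.lower condition) = b9
  generalize PySem.Str.isIn "bronchitis" (PySem.Str.lower condition) = b10
  generalize PySem.Str.isIn "atelectasis" (PySem.Str.lower condition) = b11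
  generalize PySem.Str.isIn "normal" (PySem.Str.lower condition) = b12
  revert b1 b2 b3 b4 b5 b6 b7 b8 b9 b10 b11 b12
  decide

-- ===== VERDICT (by name: the statement is the Claim_ definition above) =====
theorem get_condition_priority_py_spec : Claim_equal_get_condition_priority_py := by
  intro condition _
  exact pvFirstHit_eq_maxHit condition
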